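-- pv_equiv track=rewrite | github.com/pypi-data/pypi-mirror-99 | packages/relycomply-cli/relycomply_cli-0.3.0-py3-none-any.whl/relycomply_cli/generate_gql.py | format_graphql
-- ===== SOURCE A (Python) =====
-- import textwrap
-- from contextlib import contextmanager
--
-- class IndentWriter:
--     """
--     A simple utility to help with witing indented structures
--     """
--
--     def __init__(self):
--         self.buffer = []
--         self.level = 0
--
--     @contextmanager
--     def indent(self):
--         self.increment()
--         yield
--         self.decrement()
--
--     @contextmanager
--     def space(self):
--         self("")
--         yield
--         self("")
--
--     def increment(self):
--         self.level += 1
--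
--     def decrement(self):
--         self.level -= 1
--
--     def __call__(self, content):
--         if isinstance(content, str):
--             self([content])
--         else:
--             self.buffer.extend(["  " * self.level + line for line in content])
--
--     def result(self):
--         return "\n".join(self.buffer)
--
-- def format_graphql(call_type, args, field_name, node_path, node_gql):
--     """
--     Formats a graphQL statement based on its parts
--     """
--
--     wrt = IndentWriter()
--
--     # Strips off the edge braces and clears and empty lines
--     node_gql_body = list(
--         filter(
--             lambda line: line,
--             textwrap.dedent(node_gql.strip().strip("{").strip("}")).split("\n"),
--         )
--     )
--
--     wrt(f"{call_type}(")
--     with wrt.indent():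
--         wrt([(f"${name}: {type}") for name, type in args])
--     wrt(") {")
--
--     with wrt.space():
--         with wrt.indent():
--             wrt(f"{field_name}(")
--             with wrt.indent():
--                 wrt([(f"{name}: ${name}") for name, _ in args])
--             wrt(") {")
--
--             with wrt.indent():
--                 with wrt.space():
--                     for part in node_path[:-1]:
--                         wrt(part + " {")
--                         wrt.increment()
--                     if node_gql_body:
--                         wrt(node_path[-1] + " {")
--                         with wrt.space():
--                             with wrt.indent():
--                                 wrt(node_gql_body)
--                         wrt("}")
--                     else:
--                         wrt(node_path[-1])
--
--                     for part in node_path[1:]: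
--                         wrt.decrement()
--                         wrt("}")
--             wrt("}")
--     wrt("}")
--
--     result = wrt.result()
--     return result
-- ===== SOURCE B (Python) =====
-- import textwrap
--
--
-- def format_graphql(call_type, args, field_name, node_path, node_gql):
--     body = [
--         line
--         for line in textwrap.dedent(node_gql.strip().strip("{").strip("}")).split("\n")
--         if line
--     ]
--     outer, last = node_path[:-1], node_path[-1]
--     k = len(outer)
--     d = "  " * (k + 2)
--     if body:
--         center = [d + last + " {", d] + [d + "  " + line for line in body] + [d, d + "}"]
--     else:
--         center = [d + last]
--     opens = ["  " * (i + 2) + part + " {" for i, part in enumerate(outer)]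
--     closes = ["  " * (i + 2) + "}" for i in reversed(range(k))]
--     return "\n".join(
--         [call_type + "("]
--         + [f"  ${name}: {type}" for name, type in args]
--         + [") {", "", f"  {field_name}("]
--         + [f"    {name}: ${name}" for name, _ in args]
--         + ["  ) {", "    "]
--         + opens + center + closes
--         + ["    ", "  }", "", "}"]
--     )
-- ===== Notes on version B (the rewrite author's own statement) =====
-- stated objective: alternative
-- what changed: Replaces A's stateful IndentWriter (a buffer plus an increment/decrement level counter driven by context managers) with a pure one-pass assembly: the indent of every line is computed in closed form from its position (enumerate for the opening path segments, reversed range for the closing braces), and the result is one flat list expression joined with newlines.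
import Mathlib
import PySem

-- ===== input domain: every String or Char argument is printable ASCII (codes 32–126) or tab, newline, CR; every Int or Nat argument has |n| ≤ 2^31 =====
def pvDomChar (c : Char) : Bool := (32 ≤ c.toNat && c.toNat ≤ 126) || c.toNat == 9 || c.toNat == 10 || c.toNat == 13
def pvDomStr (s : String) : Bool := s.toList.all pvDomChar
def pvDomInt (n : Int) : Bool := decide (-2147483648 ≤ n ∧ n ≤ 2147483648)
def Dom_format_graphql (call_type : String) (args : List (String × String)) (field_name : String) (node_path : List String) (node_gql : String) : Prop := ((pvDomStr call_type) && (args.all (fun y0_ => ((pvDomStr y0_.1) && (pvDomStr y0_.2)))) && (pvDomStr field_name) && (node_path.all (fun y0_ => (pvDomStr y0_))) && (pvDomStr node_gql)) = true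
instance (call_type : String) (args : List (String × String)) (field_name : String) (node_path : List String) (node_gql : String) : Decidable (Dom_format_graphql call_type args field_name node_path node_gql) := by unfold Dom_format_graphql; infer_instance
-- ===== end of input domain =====

-- B replaces A's stateful IndentWriter (buffer + increment/decrement level counter driven
-- by context managers) with a pure one-pass assembly whose indent for every line is
-- computed in closed form from its position (objective: alternative decomposition).

-- ===== PORT A =====
-- shared hand port of textwrap.dedent (called by both Python sources), exact on
-- '\n'-separated text: whitespace-only lines are blanked first (regex ^[ \t]+$), the
-- margin is the longest common ' '/'\t' prefix of the remaining lines' indents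
-- (dedent's three-way startswith/truncate branch computes exactly that longest common
-- prefix), and the margin is stripped from every line that starts with it.
def pyWsChar (c : Char) : Bool := c == ' ' || c == '\t'

def pyCommonPrefix : List Char → List Char → List Char
  | a :: as, b :: bs => if a == b then a :: pyCommonPrefix as bs else []
  | _, _ => []

def pyDedent (text : String) : String :=
  let lines := PySem.Chars.splitOn text.toList ['\n']
  let lines := lines.map (fun l => if !l.isEmpty && l.all pyWsChar then [] else l)
  let indents := (lines.filter (fun l => !l.isEmpty)).map (fun l => l.takeWhile pyWsChar)
  let margin := match indents with
    | [] => []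
    | i :: rest => rest.foldl pyCommonPrefix i
  let lines := if margin.isEmpty then lines
    else lines.map (fun l => if l.take margin.length = margin then l.drop margin.length else l)
  String.ofList (PySem.Chars.join ['\n'] lines)

-- node_gql_body: the identical expression occurs in Source A and Source B
-- (dedent the brace-stripped text, split on '\n', keep non-empty lines)
def pyNodeBody (node_gql : String) : List String :=
  ((PySem.Str.split? (pyDedent (PySem.Str.stripChars (PySem.Str.stripChars
      (PySem.Str.strip node_gql) "{") "}")) "\n").getD []).filter (fun l => decide (l ≠ ""))

-- "  " * level  (Python string repetition; a negative level gives "";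
-- shared: A repeats per writer level, B repeats per computed position)
def pyIndent (level : Int) : String := String.join (List.replicate level.toNat "  ")

-- IndentWriter.__call__ : extend the buffer with the lines prefixed by the current indent
def pyWrite (buf : List String) (level : Int) (ls : List String) : List String :=
  buf ++ ls.map (fun l => pyIndent level ++ l)

def format_graphql (call_type : String) (args : List (String × String)) (field_name : String) (node_path : List String) (node_gql : String) : String :=
  let node_gql_body := pyNodeBody node_gql
  let buf := pyWrite [] 0 [call_type ++ "("]
  let buf := pyWrite buf 1 (args.map (fun a => "$" ++ a.1 ++ ": " ++ a.2))
  let buf := pyWrite buf 0 [") {"]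
  let buf := pyWrite buf 0 [""]                                      -- space() opens
  let buf := pyWrite buf 1 [field_name ++ "("]
  let buf := pyWrite buf 2 (args.map (fun a => a.1 ++ ": $" ++ a.1))
  let buf := pyWrite buf 1 [") {"]
  let buf := pyWrite buf 2 [""]                                      -- inner space() opens
  -- for part in node_path[:-1]: write "part {" then increment
  let st := (PySem.List.slice node_path none (some (-1))).foldl
    (fun (st : List String × Int) part => (pyWrite st.1 st.2 [part ++ " {"], st.2 + 1)) (buf, 2)
  -- node_path[-1]; none = IndexError, excluded by Pre_format_graphql
  let last := (PySem.List.pyGet? node_path (-1)).getD ""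
  let st :=
    if node_gql_body ≠ [] then
      let b := pyWrite st.1 st.2 [last ++ " {"]
      let b := pyWrite b st.2 [""]                                   -- space() opens
      let b := pyWrite b (st.2 + 1) node_gql_body
      let b := pyWrite b st.2 [""]                                   -- space() closes
      (pyWrite b st.2 ["}"], st.2)
    else (pyWrite st.1 st.2 [last], st.2)
  -- for part in node_path[1:]: decrement then write "}"
  let st := (PySem.List.slice node_path (some 1) none).foldl
    (fun (st : List String × Int) _ => (pyWrite st.1 (st.2 - 1) ["}"], st.2 - 1)) st
  let buf := pyWrite st.1 2 [""]                                     -- inner space() closes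
  let buf := pyWrite buf 1 ["}"]
  let buf := pyWrite buf 0 [""]                                      -- space() closes
  let buf := pyWrite buf 0 ["}"]
  PySem.Str.join "\n" buf

-- ===== PORT B =====
def format_graphql_alt (call_type : String) (args : List (String × String)) (field_name : String) (node_path : List String) (node_gql : String) : String :=
  let body := pyNodeBody node_gql
  let outer := PySem.List.slice node_path none (some (-1))
  let last := (PySem.List.pyGet? node_path (-1)).getD ""
  let k : Int := outer.length
  let d := pyIndent (k + 2)
  let center :=
    if body ≠ [] then
      [d ++ last ++ " {", d] ++ body.map (fun line => d ++ "  " ++ line) ++ [d, d ++ "}"]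
    else [d ++ last]
  let opens := (PySem.List.enumerate outer).map (fun ip => pyIndent (ip.1 + 2) ++ ip.2 ++ " {")
  let closes := (PySem.List.pyRange 0 k).reverse.map (fun i => pyIndent (i + 2) ++ "}")
  PySem.Str.join "\n"
    ([call_type ++ "("]
      ++ args.map (fun a => "  $" ++ a.1 ++ ": " ++ a.2)
      ++ [") {", "", "  " ++ field_name ++ "("]
      ++ args.map (fun a => "    " ++ a.1 ++ ": $" ++ a.1)
      ++ ["  ) {", "    "]
      ++ opens ++ center ++ closes
      ++ ["    ", "  }", "", "}"])

-- ===== PRECONDITION & SPEC =====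
-- Pre_ excludes only the inputs on which A raises: node_path = [] makes node_path[-1]
-- raise IndexError in A (and in B alike).
def Pre_format_graphql (call_type : String) (args : List (String × String)) (field_name : String) (node_path : List String) (node_gql : String) : Prop := node_path ≠ []
instance (call_type : String) (args : List (String × String)) (field_name : String) (node_path : List String) (node_gql : String) : Decidable (Pre_format_graphql call_type args field_name node_path node_gql) := by unfold Pre_format_graphql; infer_instance

def pvWitness_format_graphql : String × (List (String × String)) × String × List String × String :=
  ("query", [("a", "Int")], "f", ["x"], "{ x }")

def Spec_format_graphql (call_type : String) (args : List (String × String)) (field_name : String) (node_path : List String) (node_gql : String) (out : String) : Prop := out = format_graphql_alt call_type args field_name node_path node_gql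
instance (call_type : String) (args : List (String × String)) (field_name : String) (node_path : List String) (node_gql : String) (out : String) : Decidable (Spec_format_graphql call_type args field_name node_path node_gql out) := by unfold Spec_format_graphql; infer_instance

-- ===== CLAIM (what is proved, stated in full; the proofs are below) =====
def Claim_equal_format_graphql : Prop := ∀ (call_type : String) (args : List (String × String)) (field_name : String) (node_path : List String) (node_gql : String), Dom_format_graphql call_type args field_name node_path node_gql → Pre_format_graphql call_type args field_name node_path node_gql → Spec_format_graphql call_type args field_name node_path node_gql (format_graphql call_type args field_name node_path node_gql)

-- ===== LEMMAS AND PROOFS =====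

-- lines A's open loop writes, starting at level v
def opensL : Int → List String → List String
  | _, [] => []
  | v, p :: rest => (pyIndent v ++ (p ++ " {")) :: opensL (v + 1) rest

-- lines A's close loop writes: k braces at levels v+k-1 down to v
def closesL (v : Int) : Nat → List String
  | 0 => []
  | k + 1 => (pyIndent (v + k) ++ "}") :: closesL v k

-- lines A writes for the innermost node at level v
def centerL (v : Int) (last : String) (body : List String) : List String :=
  if body ≠ [] then
    [pyIndent v ++ (last ++ " {"), pyIndent v ++ ""]
      ++ body.map (fun l => pyIndent (v + 1) ++ l)
      ++ [pyIndent v ++ "", pyIndent v ++ "}"]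
  else [pyIndent v ++ last]

theorem join_snoc (l : List String) (s : String) : String.join (l ++ [s]) = String.join l ++ s := by
  induction l with
  | nil => simp [String.join]
  | cons a t ih => simp [String.join] at ih ⊢

theorem pyIndent_succ (v : Int) (hv : 0 ≤ v) : pyIndent (v + 1) = pyIndent v ++ "  " := by
  unfold pyIndent
  have h : (v + 1).toNat = v.toNat + 1 := by omega
  rw [h, List.replicate_succ']
  exact join_snoc _ _

theorem pyIndent_zero : pyIndent 0 = "" := rfl
theorem pyIndent_one : pyIndent 1 = "  " := rfl
theorem pyIndent_two : pyIndent 2 = "    " := rfl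

theorem dollar_app (x : String) : "  " ++ ("$" ++ x) = "  $" ++ x := by
  rw [(show ("  $" : String) = "  " ++ "$" from rfl), String.append_assoc]

theorem open_fold (outer : List String) (buf : List String) (v : Int) :
    outer.foldl (fun (st : List String × Int) part => (pyWrite st.1 st.2 [part ++ " {"], st.2 + 1)) (buf, v)
      = (buf ++ opensL v outer, v + outer.length) := by
  induction outer generalizing buf v with
  | nil => simp [opensL]
  | cons p rest ih =>
    rw [List.foldl_cons, ih]
    simp only [Prod.mk.injEq]
    constructor
    · simp [pyWrite, opensL]
    · simp; omega

theorem close_fold {α : Type} (l : List α) (buf : List String) (v : Int) :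
    l.foldl (fun (st : List String × Int) _ => (pyWrite st.1 (st.2 - 1) ["}"], st.2 - 1)) (buf, v)
      = (buf ++ closesL (v - l.length) l.length, v - l.length) := by
  induction l generalizing buf v with
  | nil => simp [closesL]
  | cons a rest ih =>
    rw [List.foldl_cons, ih]
    have h : closesL (v - ((rest.length : Int) + 1)) (rest.length + 1)
        = (pyIndent (v - 1) ++ "}") :: closesL (v - 1 - rest.length) rest.length := by
      have h1 : closesL (v - ((rest.length : Int) + 1)) (rest.length + 1)
          = (pyIndent (v - ((rest.length : Int) + 1) + rest.length) ++ "}")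
            :: closesL (v - ((rest.length : Int) + 1)) rest.length := rfl
      rw [h1, (by omega : v - ((rest.length : Int) + 1) + rest.length = v - 1),
        (by omega : v - ((rest.length : Int) + 1) = v - 1 - rest.length)]
    simp only [Prod.mk.injEq]
    constructor
    · simp only [List.length_cons]
      rw [(by push_cast; ring : ((rest.length + 1 : Nat) : Int) = (rest.length : Int) + 1), h]
      simp [pyWrite]
    · simp; omega

-- A's inner write sequence is exactly centerL
theorem center_write (buf : List String) (d : Int) (last : String) (body : List String) :
    (if body ≠ [] then
        (pyWrite (pyWrite (pyWrite (pyWrite (pyWrite buf d [last ++ " {"]) d [""]) (d + 1) body) d [""]) d ["}"], d)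
      else (pyWrite buf d [last], d))
      = (buf ++ centerL d last body, d) := by
  by_cases hb : body ≠ []
  · simp [hb, pyWrite, centerL]
  · simp [hb, pyWrite, centerL]

-- A's open-loop lines are B's enumerated lines
theorem opens_eq_aux (outer : List String) (j : Int) :
    opensL (j + 2) outer
      = (PySem.List.enumerate outer j).map (fun ip => pyIndent (ip.1 + 2) ++ ip.2 ++ " {") := by
  induction outer generalizing j with
  | nil => simp [opensL, PySem.List.enumerate]
  | cons p rest ih =>
    rw [(show PySem.List.enumerate (p :: rest) j = (j, p) :: PySem.List.enumerate rest (j + 1)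
      from by simp [PySem.List.enumerate])]
    rw [(show opensL (j + 2) (p :: rest)
      = (pyIndent (j + 2) ++ (p ++ " {")) :: opensL (j + 2 + 1) rest from rfl)]
    rw [(by omega : j + 2 + 1 = j + 1 + 2), ih (j + 1)]
    simp [String.append_assoc]

theorem opens_eq (outer : List String) :
    opensL 2 outer
      = (PySem.List.enumerate outer).map (fun ip => pyIndent (ip.1 + 2) ++ ip.2 ++ " {") := by
  have := opens_eq_aux outer 0
  simpa using this

-- A's close-loop lines are B's reversed-range lines
theorem closes_eq (k : Nat) :
    closesL 2 k = (PySem.List.pyRange 0 k).reverse.map (fun i => pyIndent (i + 2) ++ "}") := by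
  induction k with
  | zero => simp [closesL]
  | succ k ih =>
    rw [(show ((k + 1 : Nat) : Int) = (k : Int) + 1 from by push_cast; ring),
      PySem.List.pyRange_one_succ_right (by positivity)]
    rw [(show closesL 2 (k + 1) = (pyIndent (2 + k) ++ "}") :: closesL 2 k from rfl), ih]
    simp [(by omega : (2 : Int) + k = (k : Int) + 2)]

-- A's center lines are B's center lines
theorem center_eq (k : Nat) (last : String) (body : List String) :
    centerL (2 + (k : Int)) last body
      = (if body ≠ [] then
          [pyIndent ((k : Int) + 2) ++ last ++ " {", pyIndent ((k : Int) + 2)]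
            ++ body.map (fun line => pyIndent ((k : Int) + 2) ++ "  " ++ line)
            ++ [pyIndent ((k : Int) + 2), pyIndent ((k : Int) + 2) ++ "}"]
        else [pyIndent ((k : Int) + 2) ++ last]) := by
  rw [centerL, (by omega : (2 : Int) + k = (k : Int) + 2)]
  by_cases hb : body ≠ []
  · rw [if_pos hb, if_pos hb]
    simp [pyIndent_succ ((k : Int) + 2) (by positivity), String.append_assoc,
      String.append_empty]
  · simp [hb]

-- ===== VERDICT (by name: the statement is the Claim_ definition above) =====
theorem format_graphql_spec : Claim_equal_format_graphql := by
  intro call_type args field_name node_path node_gql _hD hP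
  unfold Spec_format_graphql
  have hsl : PySem.List.slice node_path none (some (-1)) = node_path.dropLast := by simp [pysem]
  have htl : PySem.List.slice node_path (some 1) none = node_path.tail := by simp [pysem]
  have hlen : node_path.tail.length = node_path.dropLast.length := by
    cases node_path with
    | nil => exact absurd rfl hP
    | cons a t => simp
  have h2 : (2 : Int) + (node_path.dropLast.length : Int) - (node_path.dropLast.length : Int) = 2 := by
    omega
  simp only [format_graphql, format_graphql_alt, hsl, htl, open_fold, center_write, close_fold,
    hlen, h2]
  congr 1
  rw [opens_eq node_path.dropLast, closes_eq node_path.dropLast.length,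
    center_eq node_path.dropLast.length]
  simp only [pyWrite, List.map_map, List.map_cons, List.map_nil,
    List.append_assoc, List.cons_append, List.nil_append]
  simp [pyIndent_zero, pyIndent_one, pyIndent_two, dollar_app, Function.comp_def,
    String.append_assoc]
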